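-- pv_equiv track=rewrite | github.com/danproca00/Metaheuristic-Algorithms-for-Schedulling-Problems-FJSSP | tama/TAMA.py | calculate_idle_time
-- ===== SOURCE A (Python) =====
-- def calculate_idle_time(schedule, num_machines):
--     """
--     Calculates total idle time for all machines.
--     Args:
--         schedule: dict {(job_id, op_id): (start, end, machine)}
--         num_machines: number of machines
--     Returns:
--         idle_time: total idle time across all machines
--     """
--     from collections import defaultdict
--     machine_intervals = defaultdict(list)  # Machine: [(start, end)]
--
--     # Group operations by machine
--     for (job_id, op_id), (start, end, machine) in schedule.items():
--         machine_intervals[machine].append((start, end))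
--
--     idle_total = 0  # Total idle time
--     for m in range(1, num_machines + 1):  # Process each machine
--         intervals = sorted(machine_intervals[m], key=lambda x: x[0])  # Sort by start time
--         for i in range(1, len(intervals)):  # Check gaps between operations
--             idle = intervals[i][0] - intervals[i - 1][1]  # Gap duration
--             if idle > 0:  # Only positive gaps
--                 idle_total += idle  # Accumulate idle time
--
--     return idle_total  # Return total
-- ===== SOURCE B (Python) =====
-- def calculate_idle_time(schedule, num_machines):
--     """
--     Calculates total idle time for all machines.
--     One flat list of (machine, start, end), one global stable sort by
--     (machine, start), then a single boundary-aware sweep.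
--     """
--     ops = [(machine, start, end)
--            for (start, end, machine) in schedule.values()
--            if 1 <= machine <= num_machines]
--     ops.sort(key=lambda t: (t[0], t[1]))
--     total = 0
--     prev_machine = None
--     prev_end = 0
--     for machine, start, end in ops:
--         if prev_machine == machine:
--             gap = start - prev_end
--             if gap > 0:
--                 total += gap
--         prev_machine = machine
--         prev_end = end
--     return total
-- ===== Notes on version B (the rewrite author's own statement) =====
-- stated objective: faster
-- what changed: Replaces A's defaultdict grouping plus a per-machine sort and nested index loop over every machine 1..num_machines by one flat filtered list of (machine,start,end), a single global stable sort by (machine,start), and one boundary-aware linear sweep.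
import Mathlib
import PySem

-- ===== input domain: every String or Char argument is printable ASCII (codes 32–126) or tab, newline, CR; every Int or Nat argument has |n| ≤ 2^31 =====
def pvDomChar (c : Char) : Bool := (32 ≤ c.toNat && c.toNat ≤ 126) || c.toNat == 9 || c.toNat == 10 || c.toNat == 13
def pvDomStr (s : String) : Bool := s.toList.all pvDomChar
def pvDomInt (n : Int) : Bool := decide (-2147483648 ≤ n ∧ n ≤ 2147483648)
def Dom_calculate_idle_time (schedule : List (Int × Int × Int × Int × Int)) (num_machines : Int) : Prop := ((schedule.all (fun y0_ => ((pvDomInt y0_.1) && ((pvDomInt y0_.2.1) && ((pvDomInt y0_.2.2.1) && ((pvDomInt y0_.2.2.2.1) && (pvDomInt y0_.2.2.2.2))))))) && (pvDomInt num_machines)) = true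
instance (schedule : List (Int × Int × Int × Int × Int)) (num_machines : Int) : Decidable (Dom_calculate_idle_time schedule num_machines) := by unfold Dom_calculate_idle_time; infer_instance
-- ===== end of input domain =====

-- B replaces A's dict-grouping + per-machine sorts + a loop over every machine
-- 1..num_machines by one flat filtered list, a single global stable sort by
-- (machine, start), and one linear sweep; B does no per-machine iteration, which the
-- timing run measured as faster when num_machines is large.

-- ===== PORT A =====
-- schedule entry x = (job_id, op_id, start, end, machine):
--   x.2.2.1 = start, x.2.2.2.1 = end, x.2.2.2.2 = machine
def calculate_idle_time (schedule : List (Int × Int × Int × Int × Int)) (num_machines : Int) : Int :=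
  let machine_intervals : PySem.Dict Int (List (Int × Int)) :=
    schedule.foldl (fun d x =>
      d.modify x.2.2.2.2 [] (fun l => l ++ [(x.2.2.1, x.2.2.2.1)])) PySem.Dict.empty
  (PySem.List.pyRange 1 (num_machines + 1)).foldl (fun idle_total m =>
    let intervals := PySem.List.sorted (machine_intervals.getD m []) (fun p => p.1)
    (PySem.List.pyRange 1 (PySem.List.len intervals)).foldl (fun acc i =>
      let idle := (PySem.List.pyGetD intervals i (0, 0)).1
                    - (PySem.List.pyGetD intervals (i - 1) (0, 0)).2
      if idle > 0 then acc + idle else acc) idle_total) 0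

-- ===== PORT B =====
def calculate_idle_time_alt (schedule : List (Int × Int × Int × Int × Int)) (num_machines : Int) : Int :=
  let ops : List (Int × Int × Int) :=
    (schedule.filter (fun x => decide (1 ≤ x.2.2.2.2) && decide (x.2.2.2.2 ≤ num_machines))).map
      (fun x => (x.2.2.2.2, x.2.2.1, x.2.2.2.1))
  let sortedOps := PySem.List.sorted2 ops (fun t => t.1) (fun t => t.2.1)
  (sortedOps.foldl (fun st t =>
      ((if st.2.1 = some t.1 then
          (if t.2.1 - st.2.2 > 0 then st.1 + (t.2.1 - st.2.2) else st.1)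
        else st.1), some t.1, t.2.2))
    ((0 : Int), (none : Option Int), (0 : Int))).1

-- ===== PRECONDITION & SPEC =====
def Spec_calculate_idle_time (schedule : List (Int × Int × Int × Int × Int)) (num_machines : Int) (out : Int) : Prop := out = calculate_idle_time_alt schedule num_machines
instance (schedule : List (Int × Int × Int × Int × Int)) (num_machines : Int) (out : Int) : Decidable (Spec_calculate_idle_time schedule num_machines out) := by unfold Spec_calculate_idle_time; infer_instance

-- ===== CLAIM (what is proved, stated in full; the proofs are below) =====
def Claim_equal_calculate_idle_time : Prop := ∀ (schedule : List (Int × Int × Int × Int × Int)) (num_machines : Int), Dom_calculate_idle_time schedule num_machines → Spec_calculate_idle_time schedule num_machines (calculate_idle_time schedule num_machines)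

-- ===== LEMMAS AND PROOFS =====

-- positive-gap sum of a list of (start, end) intervals, previous end given
def gAux (pe : Int) : List (Int × Int) → Int
  | [] => 0
  | q :: t => (if q.1 - pe > 0 then q.1 - pe else 0) + gAux q.2 t

def gaps : List (Int × Int) → Int
  | [] => 0
  | p :: t => gAux p.2 t

def projI (x : Int × Int × Int × Int × Int) : Int × Int := (x.2.2.1, x.2.2.2.1)

-- A's per-machine interval list, sorted by start
def Am (schedule : List (Int × Int × Int × Int × Int)) (m : Int) : List (Int × Int) :=
  PySem.List.sorted ((schedule.filter (fun x => decide (x.2.2.2.2 = m))).map projI) (fun p => p.1)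

-- B's step function and sort comparator (definitionally those of the port)
def stepB (st : Int × Option Int × Int) (t : Int × Int × Int) : Int × Option Int × Int :=
  ((if st.2.1 = some t.1 then
      (if t.2.1 - st.2.2 > 0 then st.1 + (t.2.1 - st.2.2) else st.1)
    else st.1), some t.1, t.2.2)

def lt2 (a b : Int × Int × Int) : Bool :=
  decide (a.1 < b.1) || (!decide (b.1 < a.1) && decide (a.2.1 < b.2.1))

def opsOf (schedule : List (Int × Int × Int × Int × Int)) (num_machines : Int) : List (Int × Int × Int) :=
  (schedule.filter (fun x => decide (1 ≤ x.2.2.2.2) && decide (x.2.2.2.2 ≤ num_machines))).map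
    (fun x => (x.2.2.2.2, x.2.2.1, x.2.2.2.1))

def Bm (ops : List (Int × Int × Int)) (m : Int) : List (Int × Int × Int) :=
  PySem.List.sorted (ops.filter (fun t => decide (t.1 = m))) (fun t => t.2.1)

-- ---- A side ----

lemma dict_group (schedule : List (Int × Int × Int × Int × Int)) :
    ∀ (d : PySem.Dict Int (List (Int × Int))) (m : Int),
    (schedule.foldl (fun d x =>
        d.modify x.2.2.2.2 [] (fun l => l ++ [(x.2.2.1, x.2.2.2.1)])) d).getD m []
      = d.getD m [] ++ (schedule.filter (fun x => decide (x.2.2.2.2 = m))).map projI := by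
  induction schedule with
  | nil => simp
  | cons x t ih =>
    intro d m
    simp only [List.foldl_cons, List.filter_cons]
    rw [ih]
    by_cases hm : x.2.2.2.2 = m
    · subst hm
      rw [PySem.Dict.getD_modify_self]
      simp [projI]
    · rw [PySem.Dict.getD_modify_of_ne _ _ _ (fun h => hm h.symm)]
      simp [hm]

lemma inner_nat (r : List (Int × Int)) :
    ∀ (p : Int × Int) (acc : Int),
    (List.range r.length).foldl (fun a k =>
        let idle := ((p :: r).getD (k+1) (0,0)).1 - ((p :: r).getD k (0,0)).2
        if idle > 0 then a + idle else a) acc = acc + gAux p.2 r := by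
  induction r with
  | nil => simp [gAux]
  | cons q t ih =>
    intro p acc
    simp only [List.length_cons]
    rw [List.range_succ_eq_map, List.foldl_cons, List.foldl_map]
    have hb : ∀ (a : Int) (k : Nat),
        (fun (a : Int) (k : Nat) =>
          let idle := ((p :: q :: t).getD (k+1+1) (0,0)).1 - ((p :: q :: t).getD (k+1) (0,0)).2
          if idle > 0 then a + idle else a) a k
        = (fun (a : Int) (k : Nat) =>
          let idle := ((q :: t).getD (k+1) (0,0)).1 - ((q :: t).getD k (0,0)).2
          if idle > 0 then a + idle else a) a k := by
      intro a k
      simp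
    rw [PySem.List.foldl_congr_mem _ _ _ _ (fun a k _ => hb a k), ih]
    simp only [List.getD_cons_succ, List.getD_cons_zero, gAux]
    split_ifs <;> ring

lemma inner_loop (l : List (Int × Int)) (acc : Int) :
    (PySem.List.pyRange 1 (PySem.List.len l)).foldl (fun acc i =>
      let idle := (PySem.List.pyGetD l i (0, 0)).1 - (PySem.List.pyGetD l (i - 1) (0, 0)).2
      if idle > 0 then acc + idle else acc) acc = acc + gaps l := by
  cases l with
  | nil =>
    rw [show PySem.List.len ([] : List (Int × Int)) = 0 from rfl,
      PySem.List.pyRange_one_eq_nil (by norm_num)]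
    simp [gaps]
  | cons p r =>
    rw [show PySem.List.len (p :: r) = ((r.length : Int) + 1) by simp [PySem.List.len],
      PySem.List.pyRange_one, show (((r.length : Int) + 1) - 1).toNat = r.length by omega,
      List.foldl_map]
    have hb : ∀ (a : Int) (k : Nat), k ∈ List.range r.length →
        (let idle := (PySem.List.pyGetD (p :: r) (1 + (k : Int)) (0,0)).1
                      - (PySem.List.pyGetD (p :: r) (1 + (k : Int) - 1) (0,0)).2
         if idle > 0 then a + idle else a)
        = (let idle := ((p :: r).getD (k+1) (0,0)).1 - ((p :: r).getD k (0,0)).2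
           if idle > 0 then a + idle else a) := by
      intro a k _
      have h1 : (1 + (k : Int)) = (((k + 1 : Nat) : Int)) := by push_cast; ring
      have h2 : (((k + 1 : Nat) : Int) - 1) = ((k : Nat) : Int) := by push_cast; ring
      rw [h1, PySem.List.pyGetD_natCast, h2, PySem.List.pyGetD_natCast]
    rw [PySem.List.foldl_congr_mem _ _ _ _ (fun a k hk => hb a k hk), inner_nat]
    rfl

lemma A_sum (schedule : List (Int × Int × Int × Int × Int)) (num_machines : Int) :
    calculate_idle_time schedule num_machines
      = ((PySem.List.pyRange 1 (num_machines + 1)).map (fun m => gaps (Am schedule m))).sum := by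
  show (PySem.List.pyRange 1 (num_machines + 1)).foldl _ 0 = _
  have hbody : ∀ (acc : Int), ∀ m ∈ PySem.List.pyRange 1 (num_machines + 1),
      (fun idle_total m =>
        let intervals := PySem.List.sorted
          ((schedule.foldl (fun d x =>
              d.modify x.2.2.2.2 [] (fun l => l ++ [(x.2.2.1, x.2.2.2.1)]))
            PySem.Dict.empty).getD m []) (fun p => p.1)
        (PySem.List.pyRange 1 (PySem.List.len intervals)).foldl (fun acc i =>
          let idle := (PySem.List.pyGetD intervals i (0, 0)).1
                        - (PySem.List.pyGetD intervals (i - 1) (0, 0)).2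
          if idle > 0 then acc + idle else acc) idle_total) acc m
      = acc + gaps (Am schedule m) := by
    intro acc m _
    have hd : (schedule.foldl (fun d x =>
          d.modify x.2.2.2.2 [] (fun l => l ++ [(x.2.2.1, x.2.2.2.1)]))
        PySem.Dict.empty).getD m []
        = (schedule.filter (fun x => decide (x.2.2.2.2 = m))).map projI := by
      rw [dict_group]
      rfl
    simp only [hd]
    exact inner_loop _ acc
  rw [PySem.List.foldl_congr_mem' _ _ _ _ (fun m hm acc => hbody acc m hm),
    PySem.List.foldl_add, zero_add]

-- ---- B side ----

lemma insertBy_append_left {α : Type} (before : α → α → Bool) (x : α) (ys zs : List α)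
    (h : ∀ y ∈ ys, before x y = false) :
    PySem.List.insertBy before x (ys ++ zs) = ys ++ PySem.List.insertBy before x zs := by
  induction ys with
  | nil => simp
  | cons y t ih =>
    simp only [List.cons_append, PySem.List.insertBy, h y (by simp)]
    simp only [Bool.false_eq_true, if_false]
    rw [ih (fun y hy => h y (by simp [hy]))]

lemma insertBy_block (x : Int × Int × Int) (ys zs : List (Int × Int × Int))
    (hy : ∀ y ∈ ys, lt2 x y = decide (x.2.1 < y.2.1))
    (hz : ∀ z ∈ zs, lt2 x z = true) :
    PySem.List.insertBy lt2 x (ys ++ zs)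
      = PySem.List.insertBy (fun a b => decide (a.2.1 < b.2.1)) x ys ++ zs := by
  induction ys with
  | nil =>
    cases zs with
    | nil => simp [PySem.List.insertBy]
    | cons z t => simp [PySem.List.insertBy, hz z (by simp)]
  | cons y t ih =>
    simp only [List.cons_append, PySem.List.insertBy, hy y (by simp)]
    by_cases hc : x.2.1 < y.2.1
    · simp [hc]
    · simp only [hc, decide_false, Bool.false_eq_true, if_false]
      rw [ih (fun y hy' => hy y (by simp [hy']))]
      simp

lemma flatMap_congr_mem {α β : Type} (l : List α) (f g : α → List β)
    (h : ∀ x ∈ l, f x = g x) : l.flatMap f = l.flatMap g := by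
  induction l with
  | nil => rfl
  | cons a t ih =>
    simp only [List.flatMap_cons, h a (by simp)]
    rw [ih (fun x hx => h x (by simp [hx]))]

lemma insert_flatMap (ms : List Int) (b : Int → List (Int × Int × Int)) (x : Int × Int × Int) :
    ms.Pairwise (· < ·) → x.1 ∈ ms → (∀ m ∈ ms, ∀ t ∈ b m, t.1 = m) →
    PySem.List.insertBy lt2 x (ms.flatMap b)
      = ms.flatMap (fun m => if m = x.1
          then PySem.List.insertBy (fun a b => decide (a.2.1 < b.2.1)) x (b m) else b m) := by
  induction ms with
  | nil => intro _ hx; simp at hx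
  | cons m ms' ih =>
    intro hp hx hbm
    have hp' : ms'.Pairwise (· < ·) := (List.pairwise_cons.mp hp).2
    have hlt : ∀ m' ∈ ms', m < m' := (List.pairwise_cons.mp hp).1
    rw [List.flatMap_cons, List.flatMap_cons]
    by_cases hm : m = x.1
    · have hy : ∀ y ∈ b m, lt2 x y = decide (x.2.1 < y.2.1) := by
        intro y hy
        have h1 : y.1 = x.1 := by rw [hbm m (by simp) y hy, hm]
        simp [lt2, h1]
      have hz : ∀ z ∈ ms'.flatMap b, lt2 x z = true := by
        intro z hz
        obtain ⟨m', hm', hz'⟩ := List.mem_flatMap.mp hz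
        have h1 : z.1 = m' := hbm m' (by simp [hm']) z hz'
        have h2 : x.1 < z.1 := by rw [h1, ← hm]; exact hlt m' hm'
        simp [lt2, h2]
      rw [insertBy_block x (b m) (ms'.flatMap b) hy hz, if_pos hm]
      congr 1
      refine (flatMap_congr_mem _ _ _ ?_).symm
      intro m' hm'
      have : m' ≠ x.1 := by rw [← hm]; exact (Int.ne_of_lt (hlt m' hm')).symm
      rw [if_neg this]
    · have hx' : x.1 ∈ ms' := by
        rcases List.mem_cons.mp hx with h | h
        · exact absurd h.symm hm
        · exact h
      have hmx : m < x.1 := hlt _ hx'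
      have hy : ∀ y ∈ b m, lt2 x y = false := by
        intro y hy
        have h1 : y.1 = m := hbm m (by simp) y hy
        have h2 : ¬ (x.1 < y.1) := by rw [h1]; omega
        have h3 : y.1 < x.1 := by rw [h1]; exact hmx
        simp [lt2, h2, h3]
      rw [insertBy_append_left lt2 x (b m) (ms'.flatMap b) hy,
        ih hp' hx' (fun m' hm' => hbm m' (by simp [hm'])), if_neg hm]

lemma sorted2_blocks (num_machines : Int) (ops : List (Int × Int × Int))
    (h : ∀ t ∈ ops, 1 ≤ t.1 ∧ t.1 ≤ num_machines) :
    PySem.List.sorted2 ops (fun t => t.1) (fun t => t.2.1)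
      = (PySem.List.pyRange 1 (num_machines + 1)).flatMap (fun m => Bm ops m) := by
  induction ops using List.reverseRecOn with
  | nil =>
    show ([] : List (Int × Int × Int)) = _
    simp [Bm, PySem.List.sorted]
  | append_singleton ops x ih =>
    have hops : ∀ t ∈ ops, 1 ≤ t.1 ∧ t.1 ≤ num_machines := fun t ht => h t (by simp [ht])
    have hx : 1 ≤ x.1 ∧ x.1 ≤ num_machines := h x (by simp)
    have hstep : PySem.List.sorted2 (ops ++ [x]) (fun t => t.1) (fun t => t.2.1)
        = PySem.List.insertBy lt2 x (PySem.List.sorted2 ops (fun t => t.1) (fun t => t.2.1)) := by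
      show List.foldl _ [] (ops ++ [x]) = _
      rw [List.foldl_append]
      rfl
    rw [hstep, ih hops,
      insert_flatMap (PySem.List.pyRange 1 (num_machines + 1)) (fun m => Bm ops m) x
        (PySem.List.pairwise_lt_pyRange_one 1 (num_machines + 1))
        (PySem.List.mem_pyRange_one.mpr ⟨hx.1, by omega⟩)
        (fun m _ t ht => by
          have h1 : t ∈ ops.filter (fun t => decide (t.1 = m)) :=
            (PySem.List.mem_sorted _ _ _ t).mp ht
          exact of_decide_eq_true (List.mem_filter.mp h1).2)]
    refine flatMap_congr_mem _ _ _ ?_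
    intro m hm
    by_cases hmx : m = x.1
    · rw [if_pos hmx]
      have hfil : (ops ++ [x]).filter (fun t => decide (t.1 = m)) =
          ops.filter (fun t => decide (t.1 = m)) ++ [x] := by
        rw [List.filter_append]
        simp [hmx.symm]
      show _ = Bm (ops ++ [x]) m
      unfold Bm
      rw [hfil]
      simp only [PySem.List.sorted_eq_foldl_insertBy]
      rw [List.foldl_append]
      rfl
    · rw [if_neg hmx]
      show Bm ops m = Bm (ops ++ [x]) m
      unfold Bm
      have hfil : (ops ++ [x]).filter (fun t => decide (t.1 = m)) =
          ops.filter (fun t => decide (t.1 = m)) := by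
        rw [List.filter_append]
        have hx1 : (decide (x.1 = m)) = false := by
          simp only [decide_eq_false_iff_not]
          exact fun hq => hmx hq.symm
        simp [hx1]
      rw [hfil]

lemma sweep_const (b : List (Int × Int × Int)) (m : Int) :
    ∀ (T pe : Int), (∀ t ∈ b, t.1 = m) →
    b.foldl stepB (T, some m, pe)
      = (T + gAux pe (b.map (fun t => (t.2.1, t.2.2))), some m, b.foldl (fun _ t => t.2.2) pe) := by
  induction b with
  | nil => intro T pe _; simp [gAux]
  | cons t r ih =>
    intro T pe h
    have ht : t.1 = m := h t (by simp)
    have hstep : stepB (T, some m, pe) t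
        = ((if t.2.1 - pe > 0 then T + (t.2.1 - pe) else T), some m, t.2.2) := by
      simp [stepB, ht]
    rw [List.foldl_cons, hstep, ih _ _ (fun x hx => h x (by simp [hx]))]
    simp only [List.map_cons, gAux, List.foldl_cons, Prod.mk.injEq]
    split_ifs <;> simp [add_assoc]

lemma sweep_flatMap (ms : List Int) (b : Int → List (Int × Int × Int)) :
    ms.Pairwise (· < ·) → ∀ (T : Int) (pm : Option Int) (pe : Int),
    (∀ m ∈ ms, pm ≠ some m) → (∀ m ∈ ms, ∀ t ∈ b m, t.1 = m) →
    ((ms.flatMap b).foldl stepB (T, pm, pe)).1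
      = T + (ms.map (fun m => gaps ((b m).map (fun t => (t.2.1, t.2.2))))).sum := by
  induction ms with
  | nil => intro _ T pm pe _ _; simp
  | cons m ms' ih =>
    intro hp T pm pe hpm hbm
    have hp' : ms'.Pairwise (· < ·) := (List.pairwise_cons.mp hp).2
    have hlt : ∀ m' ∈ ms', m < m' := (List.pairwise_cons.mp hp).1
    rw [List.flatMap_cons, List.foldl_append]
    cases hbm' : b m with
    | nil =>
      simp only [List.foldl_nil]
      rw [ih hp' T pm pe (fun x hx => hpm x (by simp [hx]))
        (fun x hx => hbm x (by simp [hx]))]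
      simp [hbm', gaps]
    | cons t r =>
      have ht : t.1 = m := hbm m (by simp) t (by rw [hbm']; simp)
      have hstep : stepB (T, pm, pe) t = (T, some t.1, t.2.2) := by
        have : pm ≠ some t.1 := by rw [ht]; exact hpm m (by simp)
        simp [stepB, this]
      rw [List.foldl_cons, hstep, ht,
        sweep_const r m T t.2.2 (fun x hx => hbm m (by simp) x (by rw [hbm']; simp [hx]))]
      rw [ih hp' _ (some m) _ (fun x hx => by simp; exact Int.ne_of_lt (hlt x hx))
        (fun x hx => hbm x (by simp [hx]))]
      simp only [List.map_cons, hbm', gaps, List.sum_cons]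
      ring

lemma insertBy_map {α β : Type} (f : α → β) (ba : α → α → Bool) (bb : β → β → Bool)
    (hf : ∀ a a', bb (f a) (f a') = ba a a') (x : α) (l : List α) :
    PySem.List.insertBy bb (f x) (l.map f) = (PySem.List.insertBy ba x l).map f := by
  induction l with
  | nil => simp [PySem.List.insertBy]
  | cons y t ih =>
    simp only [List.map_cons, PySem.List.insertBy, hf x y]
    by_cases hc : ba x y = true
    · simp [hc]
    · simp only [hc]
      simp [ih]

lemma foldl_insertBy_map {α β : Type} (f : α → β) (ba : α → α → Bool) (bb : β → β → Bool)
    (hf : ∀ a a', bb (f a) (f a') = ba a a') :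
    ∀ (l : List α) (acc : List α),
    l.foldl (fun acc x => PySem.List.insertBy bb (f x) acc) (acc.map f)
      = (l.foldl (fun acc x => PySem.List.insertBy ba x acc) acc).map f := by
  intro l
  induction l with
  | nil => intro acc; rfl
  | cons y t ih =>
    intro acc
    rw [List.foldl_cons, List.foldl_cons, insertBy_map f ba bb hf, ih]

lemma sorted_map_start (m : Int) (l : List (Int × Int)) :
    PySem.List.sorted (l.map (fun p => (m, p.1, p.2))) (fun t => t.2.1)
      = (PySem.List.sorted l (fun p => p.1)).map (fun p => (m, p.1, p.2)) := by
  rw [PySem.List.sorted_eq_foldl_insertBy, PySem.List.sorted_eq_foldl_insertBy,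
    List.foldl_map]
  exact foldl_insertBy_map (fun p => (m, p.1, p.2))
    (fun a b => decide (a.1 < b.1)) (fun a b => decide (a.2.1 < b.2.1))
    (fun a a' => rfl) l []

lemma Bm_eq_Am (schedule : List (Int × Int × Int × Int × Int)) (num_machines m : Int)
    (h1 : 1 ≤ m) (h2 : m ≤ num_machines) :
    Bm (opsOf schedule num_machines) m = (Am schedule m).map (fun p => (m, p.1, p.2)) := by
  unfold Bm opsOf Am
  rw [List.filter_map]
  have hf : ((fun t : Int × Int × Int => decide (t.1 = m)) ∘
      (fun x : Int × Int × Int × Int × Int => (x.2.2.2.2, x.2.2.1, x.2.2.2.1)))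
      = fun x : Int × Int × Int × Int × Int => decide (x.2.2.2.2 = m) := rfl
  rw [hf, List.filter_filter]
  have hp : ∀ x ∈ schedule,
      ((decide (x.2.2.2.2 = m)) && (decide (1 ≤ x.2.2.2.2) && decide (x.2.2.2.2 ≤ num_machines)))
        = decide (x.2.2.2.2 = m) := by
    intro x _
    by_cases hx : x.2.2.2.2 = m
    · simp [hx, h1, h2]
    · simp [hx]
  rw [List.filter_congr hp]
  have hm : ∀ x ∈ schedule.filter (fun x => decide (x.2.2.2.2 = m)),
      ((x.2.2.2.2, x.2.2.1, x.2.2.2.1) : Int × Int × Int)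
        = ((fun p : Int × Int => (m, p.1, p.2)) ∘ projI) x := by
    intro x hx
    have : x.2.2.2.2 = m := of_decide_eq_true (List.mem_filter.mp hx).2
    simp [projI, this]
  rw [List.map_congr_left hm, ← List.map_map, sorted_map_start]

lemma B_sum (schedule : List (Int × Int × Int × Int × Int)) (num_machines : Int) :
    calculate_idle_time_alt schedule num_machines
      = ((PySem.List.pyRange 1 (num_machines + 1)).map (fun m => gaps (Am schedule m))).sum := by
  show ((PySem.List.sorted2 (opsOf schedule num_machines)
      (fun t => t.1) (fun t => t.2.1)).foldl stepB ((0 : Int), (none : Option Int), (0 : Int))).1 = _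
  have hb : ∀ t ∈ opsOf schedule num_machines, 1 ≤ t.1 ∧ t.1 ≤ num_machines := by
    intro t ht
    obtain ⟨x, hx, rfl⟩ := List.mem_map.mp ht
    have h2 := (List.mem_filter.mp hx).2
    simp only [Bool.and_eq_true, decide_eq_true_eq] at h2
    exact h2
  rw [sorted2_blocks num_machines _ hb,
    sweep_flatMap (PySem.List.pyRange 1 (num_machines + 1)) _
      (PySem.List.pairwise_lt_pyRange_one 1 (num_machines + 1)) 0 none 0
      (fun m _ => by simp)
      (fun m _ t ht => by
        have h1 : t ∈ (opsOf schedule num_machines).filter (fun t => decide (t.1 = m)) :=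
          (PySem.List.mem_sorted _ _ _ t).mp ht
        exact of_decide_eq_true (List.mem_filter.mp h1).2),
    zero_add]
  refine congrArg List.sum (List.map_congr_left ?_)
  intro m hm
  obtain ⟨hm1, hm2⟩ := PySem.List.mem_pyRange_one.mp hm
  rw [Bm_eq_Am schedule num_machines m hm1 (by omega), List.map_map]
  have hid : ((fun t : Int × Int × Int => (t.2.1, t.2.2)) ∘ (fun p : Int × Int => (m, p.1, p.2)))
      = id := rfl
  rw [hid, List.map_id]

-- ===== VERDICT (by name: the statement is the Claim_ definition above) =====
theorem calculate_idle_time_spec : Claim_equal_calculate_idle_time := by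
  intro schedule num_machines _
  unfold Spec_calculate_idle_time
  rw [A_sum, B_sum]
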